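-- pv_equiv track=rewrite | github.com/LuisAPC/test_programs | 1 Month Preparation Kit/week 1/Mock Test.py | flippingMatrix
-- ===== SOURCE A (Python) =====
-- def flippingMatrix(matrix):
--     n = int(len(matrix) / 2)
--     sum = 0
--     i = 0
--
--     while (i < n) :
--         j = 0
--         while (j < n) :
--             sum += max(max(matrix[i][j],
--                            matrix[i][2 * n - j - 1]),
--                        max(matrix[2 * n - i - 1][j],
--                            matrix[2 * n - i - 1][2 * n - j - 1]))
--             j += 1
--         i += 1
--     return sum
-- ===== SOURCE B (Python) =====
-- def flippingMatrix(matrix):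
--     n = len(matrix) // 2
--     best = [None] * (n * n)
--     for r in range(2 * n):
--         for c in range(2 * n):
--             k = min(r, 2 * n - 1 - r) * n + min(c, 2 * n - 1 - c)
--             v = matrix[r][c]
--             best[k] = v if best[k] is None else max(best[k], v)
--     return sum(best)
-- ===== Notes on version B (the rewrite author's own statement) =====
-- stated objective: alternative
-- what changed: B scans every cell of the full 2n x 2n region once and folds each cell into a grouping table of n*n running maxima indexed by its symmetry-group key (min(r,2n-1-r), min(c,2n-1-c)), then sums the table, instead of A's direct four-way mirrored indexing over the top-left quadrant.
import Mathlib
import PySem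

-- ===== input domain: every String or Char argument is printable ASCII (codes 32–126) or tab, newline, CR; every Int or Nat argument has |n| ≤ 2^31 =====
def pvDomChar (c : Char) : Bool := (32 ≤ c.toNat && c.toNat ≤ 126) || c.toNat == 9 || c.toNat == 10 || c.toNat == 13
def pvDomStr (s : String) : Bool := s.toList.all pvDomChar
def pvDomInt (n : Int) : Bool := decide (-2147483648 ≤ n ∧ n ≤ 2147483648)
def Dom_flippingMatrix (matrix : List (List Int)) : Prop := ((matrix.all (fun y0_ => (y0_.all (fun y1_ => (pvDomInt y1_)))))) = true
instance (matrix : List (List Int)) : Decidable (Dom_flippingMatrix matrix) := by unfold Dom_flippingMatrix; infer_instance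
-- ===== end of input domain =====

-- B scans every cell of the full 2n x 2n region once, folding each cell into a grouping
-- table of n*n running maxima indexed by its symmetry-group key
-- (min(r,2n-1-r), min(c,2n-1-c)), then sums the table — instead of A's direct four-way
-- mirrored indexing over the top-left quadrant; same O(n^2) cost ("alternative").

-- ===== PORT A =====
-- matrix[i][j] is ported as pyGetD …; Pre_ guarantees every such access is in range,
-- exactly where the Python A returns without an IndexError.
def flippingMatrix (matrix : List (List Int)) : Int :=
  -- n = int(len(matrix) / 2); truncdiv is exact for these lengths
  let n : Int := PySem.Int.truncdiv (matrix.length : Int) 2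
  (PySem.List.pyRange 0 n 1).foldl (fun sum i =>
    (PySem.List.pyRange 0 n 1).foldl (fun sum j =>
      sum + max (max (PySem.List.pyGetD (PySem.List.pyGetD matrix i []) j 0)
                     (PySem.List.pyGetD (PySem.List.pyGetD matrix i []) (2 * n - j - 1) 0))
                (max (PySem.List.pyGetD (PySem.List.pyGetD matrix (2 * n - i - 1) []) j 0)
                     (PySem.List.pyGetD (PySem.List.pyGetD matrix (2 * n - i - 1) []) (2 * n - j - 1) 0)))
      sum) 0

-- ===== PORT B =====
-- 'v if best[k] is None else max(best[k], v)' of Source B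
def bUpd (o : Option Int) (v : Int) : Int :=
  match o with
  | none => v
  | some b => max b v

-- body of Source B's inner loop: fold one cell (r,c) into the grouping table
def bCell (matrix : List (List Int)) (n : Nat) (r : Int) (best : List (Option Int)) (c : Int) : List (Option Int) :=
  let k : Int := min r (2 * (n : Int) - 1 - r) * (n : Int) + min c (2 * (n : Int) - 1 - c)
  let v : Int := PySem.List.pyGetD (PySem.List.pyGetD matrix r []) c 0
  best.set k.toNat (some (bUpd (best.getD k.toNat none) v))

-- body of Source B's outer loop: one row r
def bRow (matrix : List (List Int)) (n : Nat) (best : List (Option Int)) (r : Int) : List (Option Int) :=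
  (PySem.List.pyRange 0 (2 * (n : Int)) 1).foldl (bCell matrix n r) best

def flippingMatrix_alt (matrix : List (List Int)) : Int :=
  let n : Nat := matrix.length / 2
  let best := (PySem.List.pyRange 0 (2 * (n : Int)) 1).foldl (bRow matrix n) (List.replicate (n * n) none)
  -- sum(best): every slot holds an int by then (proved below); getD 0 is exact
  best.foldl (fun s o => s + o.getD 0) 0

-- ===== PRECONDITION & SPEC =====
-- Pre_ excludes exactly the matrices on which the Python A raises IndexError: some of the
-- first 2*(len//2) rows is shorter than 2*(len//2).
def Pre_flippingMatrix (matrix : List (List Int)) : Prop :=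
  ∀ row ∈ matrix.take (2 * (matrix.length / 2)), 2 * (matrix.length / 2) ≤ row.length
instance (matrix : List (List Int)) : Decidable (Pre_flippingMatrix matrix) := by
  unfold Pre_flippingMatrix; infer_instance
def pvWitness_flippingMatrix : List (List Int) := [[1, 2], [3, 4]]

def Spec_flippingMatrix (matrix : List (List Int)) (out : Int) : Prop := out = flippingMatrix_alt matrix
instance (matrix : List (List Int)) (out : Int) : Decidable (Spec_flippingMatrix matrix out) := by unfold Spec_flippingMatrix; infer_instance

-- ===== CLAIM (what is proved, stated in full; the proofs are below) =====
def Claim_equal_flippingMatrix : Prop := ∀ (matrix : List (List Int)), Dom_flippingMatrix matrix → Pre_flippingMatrix matrix → Spec_flippingMatrix matrix (flippingMatrix matrix)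

-- ===== LEMMAS AND PROOFS =====

-- total cell access (pyGetD with defaults), shared vocabulary of the proofs
def mget (M : List (List Int)) (r c : Nat) : Int := (M.getD r []).getD c 0

-- the four-way quadrant max as A associates it
def gMax (M : List (List Int)) (n i j : Nat) : Int :=
  max (max (mget M i j) (mget M i (2*n-1-j)))
      (max (mget M (2*n-1-i) j) (mget M (2*n-1-i) (2*n-1-j)))

-- the four-way max as B's running fold associates it
def fMax (M : List (List Int)) (n i j : Nat) : Int :=
  max (max (max (mget M i j) (mget M i (2*n-1-j))) (mget M (2*n-1-i) j))
      (mget M (2*n-1-i) (2*n-1-j))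

theorem fMax_eq_gMax (M : List (List Int)) (n i j : Nat) : fMax M n i j = gMax M n i j := by
  unfold fMax gMax
  exact max_assoc _ _ _

theorem flippingMatrix_A_sum (matrix : List (List Int)) :
    flippingMatrix matrix =
      ((List.range (matrix.length / 2)).map (fun (i : Nat) =>
        ((List.range (matrix.length / 2)).map (fun (j : Nat) =>
          gMax matrix (matrix.length / 2) i j)).sum)).sum := by
  have ht : PySem.Int.truncdiv (matrix.length : Int) 2 = ((matrix.length / 2 : Nat) : Int) := by
    simp [PySem.Int.truncdiv]
  simp only [flippingMatrix, ht, PySem.List.pyRange_one, PySem.List.foldl_add, Int.sub_zero,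
    Int.toNat_natCast, List.map_map, zero_add, Function.comp_def]
  refine congrArg List.sum (List.map_congr_left fun i hi =>
    congrArg List.sum (List.map_congr_left fun j hj => ?_))
  have hi' := List.mem_range.mp hi
  have hj' := List.mem_range.mp hj
  have e1 : 2 * ((matrix.length/2 : Nat) : Int) - (j : Int) - 1 =
      ((2*(matrix.length/2)-1-j : Nat) : Int) := by omega
  have e2 : 2 * ((matrix.length/2 : Nat) : Int) - (i : Int) - 1 =
      ((2*(matrix.length/2)-1-i : Nat) : Int) := by omega
  rw [e1, e2]
  simp [gMax, mget, PySem.List.pyGetD_natCast]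

theorem slot_lt {n i j : Nat} (hi : i < n) (hj : j < n) : i * n + j < n * n := by
  calc i * n + j < i * n + n := by omega
  _ = (i + 1) * n := by ring
  _ ≤ n * n := Nat.mul_le_mul_right n (by omega)

theorem slot_inj {n i j i' j' : Nat} (hj : j < n) (hj' : j' < n) :
    i * n + j = i' * n + j' ↔ i = i' ∧ j = j' := by
  constructor
  · intro h
    have hn : 0 < n := by omega
    have hii : i = i' := by
      have h1 : (i * n + j) / n = i := by
        rw [Nat.mul_comm i n, Nat.mul_add_div hn, Nat.div_eq_of_lt hj]; omega
      have h2 : (i' * n + j') / n = i' := by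
        rw [Nat.mul_comm i' n, Nat.mul_add_div hn, Nat.div_eq_of_lt hj']; omega
      rw [← h1, ← h2, h]
    subst hii
    exact ⟨rfl, by omega⟩
  · rintro ⟨rfl, rfl⟩; rfl

theorem getD_set_self {α : Type} (l : List α) (k : Nat) (a d : α) (h : k < l.length) :
    (l.set k a).getD k d = a := by
  simp [List.getD_eq_getElem?_getD, h]

theorem getD_set_ne {α : Type} (l : List α) (k k' : Nat) (a d : α) (h : k ≠ k') :
    (l.set k a).getD k' d = l.getD k' d := by
  simp [List.getD_eq_getElem?_getD, List.getElem?_set_ne h]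

theorem bCell_eq (M : List (List Int)) (n rn cn : Nat) (hr : rn < 2*n) (hc : cn < 2*n)
    (best : List (Option Int)) :
    bCell M n (rn : Int) best (cn : Int) =
      best.set (min rn (2*n-1-rn) * n + min cn (2*n-1-cn))
        (some (bUpd (best.getD (min rn (2*n-1-rn) * n + min cn (2*n-1-cn)) none)
                    (mget M rn cn))) := by
  have h1 : (2 * (n : Int) - 1 - (rn : Int)) = ((2*n-1-rn : Nat) : Int) := by omega
  have h2 : (2 * (n : Int) - 1 - (cn : Int)) = ((2*n-1-cn : Nat) : Int) := by omega
  have hk : min (rn : Int) ((2*n-1-rn : Nat) : Int) * (n : Int) +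
      min (cn : Int) ((2*n-1-cn : Nat) : Int) =
      ((min rn (2*n-1-rn) * n + min cn (2*n-1-cn) : Nat) : Int) := by
    push_cast; rfl
  unfold bCell
  simp only [mget, PySem.List.pyGetD_natCast, h1, h2]
  rw [hk, Int.toNat_natCast]

theorem inner_inv (M : List (List Int)) (n rn : Nat) (hr : rn < 2*n)
    (best : List (Option Int)) (hlen : best.length = n*n) :
    ∀ m, m ≤ 2*n →
      (((PySem.List.pyRange 0 (m : Int) 1).foldl (bCell M n (rn : Int)) best).length = n*n) ∧
      (∀ i j, i < n → j < n →
        ((PySem.List.pyRange 0 (m : Int) 1).foldl (bCell M n (rn : Int)) best).getD (i*n+j) none =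
          if i = min rn (2*n-1-rn) ∧ 2*n-1-j < m then
            some (max (bUpd (best.getD (i*n+j) none) (mget M rn j)) (mget M rn (2*n-1-j)))
          else if i = min rn (2*n-1-rn) ∧ j < m then
            some (bUpd (best.getD (i*n+j) none) (mget M rn j))
          else best.getD (i*n+j) none) := by
  intro m
  induction m with
  | zero =>
    intro _
    simp [PySem.List.pyRange_one_eq_nil, hlen]
  | succ m ih =>
    intro hm
    obtain ⟨ihlen, ihsl⟩ := ih (by omega)
    have hcast : ((m+1 : Nat) : Int) = (m : Int) + 1 := by push_cast; ring
    have hsplit : PySem.List.pyRange 0 ((m+1 : Nat) : Int) 1 =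
        PySem.List.pyRange 0 (m : Int) 1 ++ [(m : Int)] := by
      rw [hcast, PySem.List.pyRange_one_succ_right (by positivity)]
    rw [hsplit, List.foldl_append, List.foldl_cons, List.foldl_nil,
      bCell_eq M n rn m hr (by omega)]
    have hKm : min m (2*n-1-m) < n := by omega
    have hI : min rn (2*n-1-rn) < n := by omega
    have hsetlen : ∀ (l : List (Option Int)) k a, (l.set k a).length = l.length :=
      fun l k a => List.length_set ..
    refine ⟨by rw [hsetlen, ihlen], ?_⟩
    intro i j hi hj
    by_cases hhit : i = min rn (2*n-1-rn) ∧ j = min m (2*n-1-m)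
    · obtain ⟨hi', hj'⟩ := hhit
      have hidx : min rn (2*n-1-rn) * n + min m (2*n-1-m) = i*n+j := by rw [hi', hj']
      rw [hidx, getD_set_self _ _ _ _ (by rw [ihlen]; exact slot_lt hi hj),
        ihsl i j hi hj]
      by_cases hmn : m < n
      · have hjm : j = m := by omega
        have c1 : ¬ (i = min rn (2*n-1-rn) ∧ 2*n-1-j < m) := by omega
        have c2 : ¬ (i = min rn (2*n-1-rn) ∧ j < m) := by omega
        have c3 : ¬ (i = min rn (2*n-1-rn) ∧ 2*n-1-j < m+1) := by omega
        have c4 : (i = min rn (2*n-1-rn) ∧ j < m+1) := by omega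
        rw [if_neg c1, if_neg c2, if_neg c3, if_pos c4, hjm]
      · have hjm : 2*n-1-j = m := by omega
        have c1 : ¬ (i = min rn (2*n-1-rn) ∧ 2*n-1-j < m) := by omega
        have c2 : (i = min rn (2*n-1-rn) ∧ j < m) := by omega
        have c3 : (i = min rn (2*n-1-rn) ∧ 2*n-1-j < m+1) := by omega
        rw [if_neg c1, if_pos c2, if_pos c3, ← hjm]
        rfl
    · have hne : min rn (2*n-1-rn) * n + min m (2*n-1-m) ≠ i*n+j := by
        intro h
        exact hhit ⟨((slot_inj hKm hj).mp h).1.symm, ((slot_inj hKm hj).mp h).2.symm⟩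
      rw [getD_set_ne _ _ _ _ _ hne, ihsl i j hi hj]
      split_ifs <;> first | rfl | omega

theorem outer_inv (M : List (List Int)) (n : Nat) :
    ∀ s, s ≤ 2*n →
      (((PySem.List.pyRange 0 (s : Int) 1).foldl (bRow M n)
          (List.replicate (n*n) (none : Option Int))).length = n*n) ∧
      (∀ i j, i < n → j < n →
        ((PySem.List.pyRange 0 (s : Int) 1).foldl (bRow M n)
            (List.replicate (n*n) (none : Option Int))).getD (i*n+j) none =
          if 2*n-1-i < s then some (fMax M n i j)
          else if i < s then some (max (mget M i j) (mget M i (2*n-1-j)))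
          else none) := by
  intro s
  induction s with
  | zero =>
    intro _
    refine ⟨by simp [PySem.List.pyRange_one_eq_nil], ?_⟩
    intro i j hi hj
    simp [PySem.List.pyRange_one_eq_nil]
  | succ s ih =>
    intro hs
    obtain ⟨ihlen, ihsl⟩ := ih (by omega)
    have hcast : ((s+1 : Nat) : Int) = (s : Int) + 1 := by push_cast; ring
    have hsplit : PySem.List.pyRange 0 ((s+1 : Nat) : Int) 1 =
        PySem.List.pyRange 0 (s : Int) 1 ++ [(s : Int)] := by
      rw [hcast, PySem.List.pyRange_one_succ_right (by positivity)]
    rw [hsplit, List.foldl_append, List.foldl_cons, List.foldl_nil]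
    have hc2 : (2 * (n : Int)) = ((2*n : Nat) : Int) := by push_cast; ring
    have hrow : ∀ b, bRow M n b (s : Int) =
        (PySem.List.pyRange 0 ((2*n : Nat) : Int) 1).foldl (bCell M n (s : Int)) b := by
      intro b
      unfold bRow
      rw [hc2]
    rw [hrow]
    obtain ⟨len2, sl2⟩ := inner_inv M n s (by omega) _ ihlen (2*n) (le_refl _)
    refine ⟨len2, ?_⟩
    intro i j hi hj
    rw [sl2 i j hi hj, ihsl i j hi hj]
    have hn : 0 < n := by omega
    have hj2 : 2*n-1-j < 2*n := by omega
    by_cases hiI : i = min s (2*n-1-s)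
    · by_cases hsn : s < n
      · have his : i = s := by omega
        have cA : ¬ (2*n-1-i < s) := by omega
        have cB : ¬ (i < s) := by omega
        have cC : ¬ (2*n-1-i < s+1) := by omega
        have cD : i < s+1 := by omega
        rw [if_pos ⟨hiI, hj2⟩, if_neg cA, if_neg cB, if_neg cC, if_pos cD, his]
        rfl
      · have his2 : 2*n-1-i = s := by omega
        have cA : ¬ (2*n-1-i < s) := by omega
        have cB : i < s := by omega
        have cC : 2*n-1-i < s+1 := by omega
        rw [if_pos ⟨hiI, hj2⟩, if_neg cA, if_pos cB, if_pos cC, ← his2]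
        simp [fMax, bUpd]
    · have c1 : ¬ (i = min s (2*n-1-s) ∧ 2*n-1-j < 2*n) := fun h => hiI h.1
      have c2 : ¬ (i = min s (2*n-1-s) ∧ j < 2*n) := fun h => hiI h.1
      rw [if_neg c1, if_neg c2]
      split_ifs <;> first | rfl | omega

theorem list_sum_range (f : Nat → Int) (n : Nat) :
    ((List.range n).map f).sum = ∑ i ∈ Finset.range n, f i := by
  induction n with
  | zero => simp
  | succ n ih => simp [List.range_succ, Finset.sum_range_succ, ih]

theorem sum_div_mod (n : Nat) (f : Nat → Nat → Int) :
    ∑ k ∈ Finset.range (n*n), f (k/n) (k%n) =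
      ∑ i ∈ Finset.range n, ∑ j ∈ Finset.range n, f i j := by
  rw [← Finset.sum_product']
  refine Finset.sum_nbij' (fun k => (k/n, k%n)) (fun p => p.1*n+p.2) ?_ ?_ ?_ ?_ ?_
  · intro k hk
    have hk' := Finset.mem_range.mp hk
    have hn : 0 < n := by
      rcases Nat.eq_zero_or_pos n with h | h
      · subst h; simp at hk'
      · exact h
    exact Finset.mem_product.mpr ⟨Finset.mem_range.mpr (Nat.div_lt_iff_lt_mul hn |>.mpr hk'),
      Finset.mem_range.mpr (Nat.mod_lt _ hn)⟩
  · intro p hp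
    obtain ⟨h1, h2⟩ := Finset.mem_product.mp hp
    exact Finset.mem_range.mpr (slot_lt (Finset.mem_range.mp h1) (Finset.mem_range.mp h2))
  · intro k _
    exact Nat.div_add_mod' k n
  · intro p hp
    obtain ⟨h1, h2⟩ := Finset.mem_product.mp hp
    have hj := Finset.mem_range.mp h2
    have hn : 0 < n := by omega
    have hd : (p.1*n+p.2) / n = p.1 := by
      rw [Nat.mul_comm p.1 n, Nat.mul_add_div hn, Nat.div_eq_of_lt hj]; omega
    have hm : (p.1*n+p.2) % n = p.2 := by
      rw [Nat.mul_comm p.1 n, Nat.mul_add_mod, Nat.mod_eq_of_lt hj]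
    simp [hd, hm]
  · intro k _
    rfl

theorem map_getD {α β : Type} (l : List α) (d : α) (f : α → β) :
    l.map f = (List.range l.length).map (fun k => f (l.getD k d)) := by
  apply List.ext_getElem
  · simp
  · intro k h1 h2
    have hk : k < l.length := by simpa using h1
    simp [List.getD_eq_getElem?_getD, List.getElem?_eq_getElem hk]

theorem flippingMatrix_main (matrix : List (List Int)) :
    flippingMatrix matrix = flippingMatrix_alt matrix := by
  rw [flippingMatrix_A_sum]
  obtain ⟨blen, bsl⟩ :=
    outer_inv matrix (matrix.length/2) (2*(matrix.length/2)) (le_refl _)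
  have hc2 : (2 * ((matrix.length/2 : Nat) : Int)) = ((2*(matrix.length/2) : Nat) : Int) := by
    push_cast; ring
  unfold flippingMatrix_alt
  simp only [hc2]
  rw [PySem.List.foldl_add, map_getD _ (none : Option Int), blen, zero_add]
  have h1 : ∀ k ∈ Finset.range ((matrix.length/2)*(matrix.length/2)),
      (((PySem.List.pyRange 0 ((2*(matrix.length/2) : Nat) : Int) 1).foldl
          (bRow matrix (matrix.length/2))
          (List.replicate ((matrix.length/2)*(matrix.length/2)) (none : Option Int))).getD k none).getD 0 =
        fMax matrix (matrix.length/2) (k/(matrix.length/2)) (k%(matrix.length/2)) := by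
    intro k hk
    have hk' := Finset.mem_range.mp hk
    have hn0 : 0 < matrix.length/2 := by
      rcases Nat.eq_zero_or_pos (matrix.length/2) with h | h
      · rw [h] at hk'; simp at hk'
      · exact h
    have hi : k/(matrix.length/2) < matrix.length/2 :=
      (Nat.div_lt_iff_lt_mul hn0).mpr hk'
    have hj : k%(matrix.length/2) < matrix.length/2 := Nat.mod_lt _ hn0
    have hk2 : (k/(matrix.length/2))*(matrix.length/2) + k%(matrix.length/2) = k :=
      Nat.div_add_mod' k (matrix.length/2)
    have e := bsl _ _ hi hj
    rw [hk2] at e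
    have hcond : 2*(matrix.length/2) - 1 - (k/(matrix.length/2)) < 2*(matrix.length/2) := by
      generalize k/(matrix.length/2) = x
      omega
    rw [e, if_pos hcond]
    rfl
  simp only [list_sum_range]
  rw [Finset.sum_congr rfl h1, sum_div_mod]
  exact Finset.sum_congr rfl fun i _ => Finset.sum_congr rfl fun j _ =>
    (fMax_eq_gMax matrix (matrix.length/2) i j).symm

-- ===== VERDICT (by name: the statement is the Claim_ definition above) =====
theorem flippingMatrix_spec : Claim_equal_flippingMatrix := by
  intro matrix _ _
  exact flippingMatrix_main matrix
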